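-- pv_equiv track=rewrite | github.com/ihac/Cessa | cessa/rule.py | _powers_of_2
-- ===== SOURCE A (Python) =====
-- def _powers_of_2(num):
--     powers = []
--     i = 1
--     while (i <= num):
--         if i & num != 0:
--             powers.append(i)
--         i <<= 1
--     return powers
-- ===== SOURCE B (Python) =====
-- def _powers_of_2(num):
--     if num <= 0:
--         return []
--     rest = [2 * p for p in _powers_of_2(num >> 1)]
--     return [1] + rest if num & 1 else rest
-- ===== Notes on version B (the rewrite author's own statement) =====
-- stated objective: alternative
-- what changed: A iterates a doubling mask over every bit position up to num and tests 'i & num' each time; B instead recursively decomposes num in binary: recurse on the right-shifted number, double all results, and prepend a one-entry when num is odd.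
import Mathlib
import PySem

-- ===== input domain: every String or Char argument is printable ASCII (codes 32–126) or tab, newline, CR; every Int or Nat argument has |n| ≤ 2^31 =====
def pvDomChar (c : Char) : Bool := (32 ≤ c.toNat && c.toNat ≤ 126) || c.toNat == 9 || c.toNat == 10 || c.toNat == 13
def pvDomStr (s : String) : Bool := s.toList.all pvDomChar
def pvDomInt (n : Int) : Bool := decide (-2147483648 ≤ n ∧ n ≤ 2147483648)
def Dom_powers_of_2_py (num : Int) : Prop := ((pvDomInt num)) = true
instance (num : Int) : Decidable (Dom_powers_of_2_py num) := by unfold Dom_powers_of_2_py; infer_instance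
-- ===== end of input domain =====

-- B replaces A's mask loop over all bit positions by a recursive binary decomposition of num
-- (objective: simpler/alternative, not claimed faster).

-- ===== PORT A =====
-- A's while loop: i starts at 1, doubles each step ('i <<= 1' is exactly 'i * 2'),
-- appending i whenever 'i & num != 0'. The 0 < i argument only justifies termination.
def powAux (num i : Int) : List Int :=
  if _hi : 0 < i then  -- totality guard only: i starts at 1 and doubles, so 0 < i always holds
    if i ≤ num then
      (if PySem.Int.band i num ≠ 0 then [i] else []) ++ powAux num (i * 2)
    else []
  else []
termination_by (num - i + 1).toNat
decreasing_by omega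

def powers_of_2_py (num : Int) : List Int := powAux num 1

-- ===== PORT B =====
-- Python's 'num >> 1' is core Lean's 'num >>> 1' (floor shift); 'num & 1' is PySem.Int.band num 1.
lemma shiftR1_toNat_lt (num : Int) (h : ¬ num ≤ 0) : (num >>> (1:Nat)).toNat < num.toNat := by
  obtain ⟨m, rfl⟩ := Int.eq_ofNat_of_zero_le (by omega : (0:Int) ≤ num)
  show (Int.ofNat (m >>> 1)).toNat < _
  simp [Nat.shiftRight_one]
  omega

def powers_of_2_py_alt (num : Int) : List Int :=
  if h : num ≤ 0 then []
  else
    have := shiftR1_toNat_lt num h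
    let rest := (powers_of_2_py_alt (num >>> (1:Nat))).map (fun p => 2 * p)
    if PySem.Int.band num 1 ≠ 0 then 1 :: rest else rest
termination_by num.toNat

-- ===== PRECONDITION & SPEC =====
def Spec_powers_of_2_py (num : Int) (out : List Int) : Prop := out = powers_of_2_py_alt num
instance (num : Int) (out : List Int) : Decidable (Spec_powers_of_2_py num out) := by unfold Spec_powers_of_2_py; infer_instance

-- ===== CLAIM (what is proved, stated in full; the proofs are below) =====
def Claim_equal_powers_of_2_py : Prop := ∀ (num : Int), Dom_powers_of_2_py num → Spec_powers_of_2_py num (powers_of_2_py num)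

-- ===== LEMMAS AND PROOFS =====

lemma land_double (i m : Nat) : (2*i) &&& m = 2 * (i &&& (m/2)) := by
  apply Nat.eq_of_testBit_eq; intro j
  cases j with
  | zero => simp [Nat.testBit_zero, Nat.mul_mod_right]
  | succ j =>
    rw [Nat.testBit_land]
    rw [Nat.testBit_succ, Nat.testBit_succ, Nat.testBit_succ]
    rw [Nat.mul_div_cancel_left _ (by norm_num : 0 < 2), Nat.mul_div_cancel_left _ (by norm_num : 0 < 2)]
    rw [Nat.testBit_land]

lemma shiftR1_eq (n : Int) (h : 0 ≤ n) : n >>> (1:Nat) = ((n.toNat / 2 : Nat) : Int) := by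
  obtain ⟨m, rfl⟩ := Int.eq_ofNat_of_zero_le h
  show Int.ofNat (m >>> 1) = _
  simp [Nat.shiftRight_one]

lemma band_double (i num : Int) (hi : 0 < i) (hnum : 0 ≤ num) :
    PySem.Int.band (2*i) num = 2 * PySem.Int.band i (num >>> (1:Nat)) := by
  rw [shiftR1_eq num hnum]
  rw [PySem.Int.band_of_nonneg (by omega) hnum,
      PySem.Int.band_of_nonneg (by omega) (by omega)]
  have h1 : (2*i).toNat = 2 * i.toNat := by omega
  have h2 : (((num.toNat / 2 : Nat) : Int)).toNat = num.toNat / 2 := by omega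
  rw [h1, h2, land_double]
  push_cast
  ring

lemma powAux_double (num i : Int) (hnum : 0 ≤ num) (hi : 0 < i) :
    powAux num (i*2) = (powAux (num >>> (1:Nat)) i).map (fun p => 2*p) := by
  have hs := shiftR1_eq num hnum
  conv_lhs => rw [powAux]
  conv_rhs => rw [powAux]
  rw [dif_pos (show (0:Int) < i*2 by omega), dif_pos hi]
  have hle : (i*2 ≤ num) ↔ (i ≤ num >>> (1:Nat)) := by rw [hs]; omega
  by_cases hc : i*2 ≤ num
  · rw [if_pos hc, if_pos (hle.mp hc)]
    rw [List.map_append]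
    have hb : PySem.Int.band (i*2) num = 2 * PySem.Int.band i (num >>> (1:Nat)) := by
      rw [show i*2 = 2*i from by ring]; exact band_double i num hi hnum
    have hcond : (PySem.Int.band (i*2) num ≠ 0) ↔ (PySem.Int.band i (num >>> (1:Nat)) ≠ 0) := by
      rw [hb]; constructor <;> intro h <;> intro h' <;> apply h <;> omega
    congr 1
    · by_cases hz : PySem.Int.band i (num >>> (1:Nat)) ≠ 0
      · rw [if_pos (hcond.mpr hz), if_pos hz]
        simp [mul_comm]
      · rw [if_neg (fun h => hz (hcond.mp h)), if_neg hz]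
        rfl
    · exact powAux_double num (i*2) hnum (by omega)
  · rw [if_neg hc, if_neg (fun h => hc (hle.mpr h))]
    rfl
termination_by (num - i).toNat
decreasing_by omega

lemma band_comm_pos (a b : Int) (ha : 0 ≤ a) (hb : 0 ≤ b) :
    PySem.Int.band a b = PySem.Int.band b a := by
  rw [PySem.Int.band_of_nonneg ha hb, PySem.Int.band_of_nonneg hb ha, Nat.land_comm]

lemma main_eq (num : Int) : powers_of_2_py num = powers_of_2_py_alt num := by
  rw [powers_of_2_py_alt]
  by_cases h : num ≤ 0
  · rw [dif_pos h]
    rw [powers_of_2_py, powAux, dif_pos (by omega : (0:Int) < 1), if_neg (by omega)]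
  · rw [dif_neg h]
    have ih := main_eq (num >>> (1:Nat))
    rw [powers_of_2_py, powAux, dif_pos (by omega : (0:Int) < 1), if_pos (by omega : (1:Int) ≤ num)]
    rw [powAux_double num 1 (by omega) (by omega)]
    rw [show powAux (num >>> (1:Nat)) 1 = powers_of_2_py (num >>> (1:Nat)) from rfl, ih]
    rw [band_comm_pos 1 num (by omega) (by omega)]
    by_cases hz : PySem.Int.band num 1 ≠ 0
    · rw [if_pos hz, if_pos hz]; rfl
    · rw [if_neg hz, if_neg hz]; rfl
termination_by num.toNat
decreasing_by exact shiftR1_toNat_lt num h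

-- ===== VERDICT (by name: the statement is the Claim_ definition above) =====
theorem powers_of_2_py_spec : Claim_equal_powers_of_2_py := by
  intro num _
  exact main_eq num
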